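-- pv_equiv track=rewrite | github.com/jhoelito123/SambaServer-ASO-1-2024 | Interface/firstInterface.py | extract_shared_resources
-- ===== SOURCE A (Python) =====
-- def extract_shared_resources(lines):
--     resources = []
--     current_resource = {}
--     for line in lines:
--         line = line.strip()
--         if line.startswith("[") and line.endswith("]"):
--             if current_resource:
--                 resources.append(current_resource)
--                 current_resource = {}
--             current_resource["Nombre"] = line[1:-1]
--         elif "=" in line:
--             key, value = line.split("=", 1)
--             current_resource[key.strip()] = value.strip()
--     if current_resource:
--         resources.append(current_resource)
--     return resources
-- ===== SOURCE B (Python) =====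
-- def extract_shared_resources(lines):
--     def is_header(l):
--         return l.startswith("[") and l.endswith("]")
--
--     def block_dict(block):
--         if block and is_header(block[0]):
--             d = {"Nombre": block[0][1:-1]}
--             rest = block[1:]
--         else:
--             d = {}
--             rest = block
--         for l in rest:
--             if "=" in l:
--                 k, v = l.split("=", 1)
--                 d[k.strip()] = v.strip()
--         return d
--
--     stripped = [l.strip() for l in lines]
--     blocks, cur = [], []
--     for l in stripped:
--         if is_header(l):
--             blocks.append(cur)
--             cur = [l]
--         else:
--             cur.append(l)
--     blocks.append(cur)
--     return [d for d in map(block_dict, blocks) if d]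
-- ===== Notes on version B (the rewrite author's own statement) =====
-- stated objective: alternative
-- what changed: A builds the dicts in one stateful scan with an in-loop flush of the current dict; B first partitions the stripped lines into section blocks (a grouping pass) and then independently converts each block into a dict (seeding header blocks with 'Nombre') and keeps the non-empty ones.
import Mathlib
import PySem

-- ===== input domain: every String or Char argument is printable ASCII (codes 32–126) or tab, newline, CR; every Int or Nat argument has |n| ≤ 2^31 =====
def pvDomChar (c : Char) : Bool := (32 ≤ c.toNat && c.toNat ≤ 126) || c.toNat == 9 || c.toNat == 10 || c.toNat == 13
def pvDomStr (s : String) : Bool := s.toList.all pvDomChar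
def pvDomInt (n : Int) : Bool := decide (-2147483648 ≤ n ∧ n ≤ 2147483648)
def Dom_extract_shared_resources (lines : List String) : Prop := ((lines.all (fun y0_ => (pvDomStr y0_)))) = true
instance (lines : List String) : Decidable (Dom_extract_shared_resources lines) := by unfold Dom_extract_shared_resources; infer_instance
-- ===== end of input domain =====

-- B replaces A's single stateful scan by a grouping pass into section blocks plus an
-- independent per-block dict conversion (objective: alternative decomposition, same cost).

-- ===== PORT A =====
def extract_shared_resources (lines : List String) : List (List (String × String)) :=
  let st := lines.foldl (fun (acc : List (PySem.Dict String String) × PySem.Dict String String) line0 =>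
      let resources := acc.1
      let current_resource := acc.2
      let line := PySem.Str.strip line0
      if PySem.Str.startswith line "[" && PySem.Str.endswith line "]" then
        let p :=
          if current_resource.items ≠ [] then (resources ++ [current_resource], PySem.Dict.empty)
          else (resources, current_resource)
        (p.1, p.2.insert "Nombre" (PySem.Str.slice line (some 1) (some (-1))))
      else if PySem.Str.isIn "=" line then
        match PySem.Str.splitMax? line "=" 1 with
        | some (key :: value :: _) =>
            (resources, current_resource.insert (PySem.Str.strip key) (PySem.Str.strip value))
        | _ => (resources, current_resource)
      else (resources, current_resource))
    ([], PySem.Dict.empty)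
  (if st.2.items ≠ [] then st.1 ++ [st.2] else st.1).map (fun d => d.items)

-- ===== PORT B =====
def pvIsHeader (l : String) : Bool := PySem.Str.startswith l "[" && PySem.Str.endswith l "]"

def pvAddKV (d : PySem.Dict String String) (l : String) : PySem.Dict String String :=
  if PySem.Str.isIn "=" l then
    match PySem.Str.splitMax? l "=" 1 with
    | none => d
    | some kv =>
      match kv with
      | [] => d
      | k :: rest =>
        match rest with
        | [] => d
        | v :: _ => d.insert (PySem.Str.strip k) (PySem.Str.strip v)
  else d

def pvBlockDict (block : List String) : PySem.Dict String String :=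
  match block with
  | [] => PySem.Dict.empty
  | h :: t =>
    if pvIsHeader h then
      t.foldl pvAddKV (PySem.Dict.empty.insert "Nombre" (PySem.Str.slice h (some 1) (some (-1))))
    else (h :: t).foldl pvAddKV PySem.Dict.empty

def pvBlocks (ls : List String) : List (List String) :=
  let st := ls.foldl
    (fun (acc : List (List String) × List String) l =>
      if pvIsHeader l then (acc.1 ++ [acc.2], [l]) else (acc.1, acc.2 ++ [l]))
    ([], [])
  st.1 ++ [st.2]

def extract_shared_resources_alt (lines : List String) : List (List (String × String)) :=
  ((pvBlocks (lines.map PySem.Str.strip)).map (fun b => (pvBlockDict b).items)).filter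
    (fun d => !d.isEmpty)

-- ===== PRECONDITION & SPEC =====
def Spec_extract_shared_resources (lines : List String) (out : List (List (String × String))) : Prop := out = extract_shared_resources_alt lines
instance (lines : List String) (out : List (List (String × String))) : Decidable (Spec_extract_shared_resources lines out) := by unfold Spec_extract_shared_resources; infer_instance

-- ===== CLAIM (what is proved, stated in full; the proofs are below) =====
def Claim_equal_extract_shared_resources : Prop := ∀ (lines : List String), Dom_extract_shared_resources lines → Spec_extract_shared_resources lines (extract_shared_resources lines)

-- ===== LEMMAS AND PROOFS =====

-- A's loop body on an already-stripped line (so that A's fold is a fold of this over lines.map strip)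
def pvStepA (acc : List (PySem.Dict String String) × PySem.Dict String String) (line : String) :
    List (PySem.Dict String String) × PySem.Dict String String :=
  if PySem.Str.startswith line "[" && PySem.Str.endswith line "]" then
    let p :=
      if acc.2.items ≠ [] then (acc.1 ++ [acc.2], PySem.Dict.empty)
      else (acc.1, acc.2)
    (p.1, p.2.insert "Nombre" (PySem.Str.slice line (some 1) (some (-1))))
  else if PySem.Str.isIn "=" line then
    match PySem.Str.splitMax? line "=" 1 with
    | some (key :: value :: _) =>
        (acc.1, acc.2.insert (PySem.Str.strip key) (PySem.Str.strip value))
    | _ => (acc.1, acc.2)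
  else (acc.1, acc.2)

def pvStepB (acc : List (List String) × List String) (l : String) :
    List (List String) × List String :=
  if pvIsHeader l then (acc.1 ++ [acc.2], [l]) else (acc.1, acc.2 ++ [l])

def pvResOf (bs : List (List String)) : List (List (String × String)) :=
  (bs.map (fun b => (pvBlockDict b).items)).filter (fun d => !d.isEmpty)

def pvFinishA (st : List (PySem.Dict String String) × PySem.Dict String String) :
    List (List (String × String)) :=
  (if st.2.items ≠ [] then st.1 ++ [st.2] else st.1).map (fun d => d.items)

theorem pvBlockDict_append (cur : List String) (l : String) (h : pvIsHeader l = false) :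
    pvBlockDict (cur ++ [l]) = pvAddKV (pvBlockDict cur) l := by
  cases cur with
  | nil => simp [pvBlockDict, h]
  | cons hd t =>
    simp only [pvBlockDict, List.cons_append]
    by_cases hh : pvIsHeader hd
    · simp [hh, List.foldl_append]
    · simp [hh, List.foldl_append]

theorem pvStepA_nonheader (acc : List (PySem.Dict String String) × PySem.Dict String String)
    (l : String) (h : pvIsHeader l = false) :
    pvStepA acc l = (acc.1, pvAddKV acc.2 l) := by
  unfold pvIsHeader at h
  simp only [pvStepA, pvAddKV, h, Bool.false_eq_true, if_false]
  split
  · cases hsp : PySem.Str.splitMax? l "=" 1 with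
    | none => rfl
    | some xs => rcases xs with _ | ⟨k, _ | ⟨v, t⟩⟩ <;> rfl
  · rfl

theorem pvBlockDict_header (l : String) (h : pvIsHeader l = true) :
    pvBlockDict [l] =
      PySem.Dict.empty.insert "Nombre" (PySem.Str.slice l (some 1) (some (-1))) := by
  simp [pvBlockDict, h]

theorem pvStepB_shift (ls : List String) (blocks : List (List String)) (cur : List String) :
    ls.foldl pvStepB (blocks, cur)
      = (blocks ++ (ls.foldl pvStepB ([], cur)).1, (ls.foldl pvStepB ([], cur)).2) := by
  induction ls generalizing blocks cur with
  | nil => simp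
  | cons l ls ih =>
    simp only [List.foldl_cons, pvStepB]
    by_cases hl : pvIsHeader l
    · simp only [hl, if_true, List.nil_append]
      rw [ih (blocks ++ [cur]) [l], ih [cur] [l]]
      simp [List.append_assoc]
    · rw [if_neg hl, if_neg hl]
      exact ih blocks (cur ++ [l])

theorem pvResOf_cons (b : List String) (bs : List (List String)) :
    pvResOf (b :: bs)
      = (if ((pvBlockDict b).items.isEmpty) then [] else [(pvBlockDict b).items]) ++ pvResOf bs := by
  simp only [pvResOf, List.map_cons, List.filter_cons]
  by_cases hb : (pvBlockDict b).items.isEmpty <;> simp [hb]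

theorem pvMain (ls : List String) (res : List (PySem.Dict String String)) (cur : List String) :
    pvFinishA (ls.foldl pvStepA (res, pvBlockDict cur))
      = res.map (fun d => d.items)
        ++ pvResOf ((ls.foldl pvStepB ([], cur)).1 ++ [(ls.foldl pvStepB ([], cur)).2]) := by
  induction ls generalizing res cur with
  | nil =>
    simp only [List.foldl_nil, pvFinishA, pvResOf]
    by_cases hc : (pvBlockDict cur).items = [] <;> simp [hc]
  | cons l ls ih =>
    by_cases hl : pvIsHeader l
    · have hstepA : pvStepA (res, pvBlockDict cur) l
          = ((if (pvBlockDict cur).items ≠ [] then res ++ [pvBlockDict cur] else res),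
             pvBlockDict [l]) := by
        unfold pvIsHeader at hl
        rw [pvBlockDict_header l (by unfold pvIsHeader; exact hl)]
        simp only [pvStepA, hl, if_true]
        split
        · rfl
        · rename_i hne
          have he : pvBlockDict cur = PySem.Dict.empty :=
            PySem.Dict.ext (by simpa using hne)
          simp [he]
      simp only [List.foldl_cons, hstepA, pvStepB, hl, if_true, ih, List.nil_append]
      rw [pvStepB_shift ls [cur] [l]]
      simp only [List.cons_append, List.nil_append, pvResOf_cons]
      by_cases hc : (pvBlockDict cur).items = [] <;> simp [hc]
    · have hlf : pvIsHeader l = false := by simpa using hl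
      have hstepA : pvStepA (res, pvBlockDict cur) l = (res, pvBlockDict (cur ++ [l])) := by
        rw [pvStepA_nonheader _ _ hlf, pvBlockDict_append cur l hlf]
      simp only [List.foldl_cons, hstepA, pvStepB, hlf, Bool.false_eq_true, if_false, ih]


-- ===== VERDICT (by name: the statement is the Claim_ definition above) =====
theorem extract_shared_resources_spec : Claim_equal_extract_shared_resources := by
  intro lines _
  show extract_shared_resources lines = extract_shared_resources_alt lines
  have hA : extract_shared_resources lines
      = pvFinishA ((lines.map PySem.Str.strip).foldl pvStepA ([], pvBlockDict [])) := by
    simp only [extract_shared_resources, pvFinishA, pvBlockDict, List.foldl_map]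
    rfl
  have hB : extract_shared_resources_alt lines
      = pvResOf (((lines.map PySem.Str.strip).foldl pvStepB ([], [])).1
          ++ [((lines.map PySem.Str.strip).foldl pvStepB ([], [])).2]) := rfl
  rw [hA, hB, pvMain]
  simp
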